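-- pv_equiv track=rewrite | github.com/siqi-wang547/algo-py | create_maximum_number.py | findMaxSubarr
-- ===== SOURCE A (Python) =====
-- def findMaxSubarr(nums, k):
--     """
--     find a max subarray of length k from given array
--     :param nums:
--     :param k:
--     :return:
--     """
--     res = []
--     for i, num in enumerate(nums):
--         while res and len(res) + len(nums) - i > k and res[-1] < nums[i]:
--             res.pop()
--         if len(res) < k:
--             res.append(nums[i])
--     return res
-- ===== SOURCE B (Python) =====
-- def findMaxSubarr(nums, k):
--     """
--     find a max subarray of length k from given array
--     :param nums:
--     :param k:
--     :return:
--     """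
--     if k <= 0:
--         return []
--     n = len(nums)
--     if k >= n:
--         return list(nums)
--     res = []
--     s = 0
--     for j in range(k):
--         window = nums[s:n - k + j + 1]
--         m = max(window)
--         s += window.index(m) + 1
--         res.append(m)
--     return res
-- ===== Notes on version B (the rewrite author's own statement) =====
-- stated objective: alternative
-- what changed: Replaces A's single-pass monotonic stack (pop while a larger element can still fill the quota) by k greedy selection rounds, each taking the earliest maximum of the window nums[s:n-k+j+1] and restarting after it; degenerate cases k<=0 and k>=len(nums) are returned up front.
import Mathlib
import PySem

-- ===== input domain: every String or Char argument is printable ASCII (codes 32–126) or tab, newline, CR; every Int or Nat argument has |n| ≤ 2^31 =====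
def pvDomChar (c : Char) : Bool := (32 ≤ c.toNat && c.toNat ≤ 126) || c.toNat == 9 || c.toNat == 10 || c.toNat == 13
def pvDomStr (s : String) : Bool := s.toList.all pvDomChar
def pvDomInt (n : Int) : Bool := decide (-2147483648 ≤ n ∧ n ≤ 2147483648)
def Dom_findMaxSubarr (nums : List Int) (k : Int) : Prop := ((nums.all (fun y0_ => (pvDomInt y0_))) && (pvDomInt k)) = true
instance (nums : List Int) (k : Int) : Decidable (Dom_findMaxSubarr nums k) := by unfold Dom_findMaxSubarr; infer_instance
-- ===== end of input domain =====

-- B replaces A's single-pass monotonic stack by k greedy window-max selection rounds (alternative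
-- algorithm of different shape, not claimed faster); both compute the same list, proved below.

-- ===== PORT A =====
-- the inner `while res and len(res) + len(nums) - i > k and res[-1] < nums[i]: res.pop()`
-- (`res[-1]` of the nonempty list r :: rs is rs.getLastD r; `res.pop()` is dropLast)
def popWhileA (k n i x : Int) : List Int → List Int
  | [] => []                        -- `res` empty: the `while res and …` loop stops
  | r :: rs =>
    if ((r :: rs).length : Int) + n - i > k ∧ rs.getLastD r < x then
      popWhileA k n i x (r :: rs).dropLast   -- res.pop()
    else r :: rs
termination_by res => res.length
decreasing_by simp [List.length_dropLast]

-- `for i, num in enumerate(nums): … ; if len(res) < k: res.append(nums[i])`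
-- (`nums[i]` with `i` drawn from `enumerate(nums)` is exactly the paired element `num`)
def findMaxSubarr (nums : List Int) (k : Int) : List Int :=
  (PySem.List.enumerate nums 0).foldl
    (fun res p =>
      let r := popWhileA k (nums.length : Int) p.1 p.2 res
      if (r.length : Int) < k then r ++ [p.2] else r)
    []

-- ===== PORT B =====
-- Source B: guard k<=0 and k>=n, then k rounds: window = nums[s:n-k+j+1], m = max(window),
-- s += window.index(m)+1, res.append(m).
def findMaxSubarr_alt (nums : List Int) (k : Int) : List Int :=
  if k ≤ 0 then []
  else if (nums.length : Int) ≤ k then nums   -- `if k >= n: return list(nums)`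
  else
    ((PySem.List.pyRange 0 k 1).foldl
      (fun (st : Int × List Int) j =>
        let window := PySem.List.slice nums (some st.1) (some ((nums.length : Int) - k + j + 1))
        match PySem.List.max? window (fun y => y) with
        | none => st          -- unreachable: the window is nonempty (Python max would raise)
        | some m =>
          match PySem.List.index? window m with
          | none => st        -- unreachable: m ∈ window
          | some i => (st.1 + (i : Int) + 1, st.2 ++ [m]))
      (0, [])).2

-- ===== PRECONDITION & SPEC =====
def Spec_findMaxSubarr (nums : List Int) (k : Int) (out : List Int) : Prop := out = findMaxSubarr_alt nums k
instance (nums : List Int) (k : Int) (out : List Int) : Decidable (Spec_findMaxSubarr nums k out) := by unfold Spec_findMaxSubarr; infer_instance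

-- ===== CLAIM (what is proved, stated in full; the proofs are below) =====
def Claim_equal_findMaxSubarr : Prop := ∀ (nums : List Int) (k : Int), Dom_findMaxSubarr nums k → Spec_findMaxSubarr nums k (findMaxSubarr nums k)

-- ===== LEMMAS AND PROOFS =====

-- Proof-side model of A's loop: the stack reversed (head = top), indexed by the number d of
-- elements still to process (d = len(nums) - i, including the current one).
def popD (k d x : Int) : List Int → List Int
  | [] => []
  | t :: rest =>
    if ((t :: rest).length : Int) + d > k ∧ t < x then popD k d x rest else t :: rest

def stepD (k d x : Int) (r : List Int) : List Int :=
  let r' := popD k d x r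
  if (r'.length : Int) < k then x :: r' else r'

def runD (k : Int) : List Int → List Int → List Int
  | [], r => r
  | x :: xs, r => runD k xs (stepD k ((xs.length : Int) + 1) x r)

-- Proof-side recursive form of B: pick the earliest max of the window, recurse on the suffix.
def selW : List Int → Nat → List Int
  | _, 0 => []
  | xs, (t+1) =>
    let win := xs.take (xs.length - t)
    match PySem.List.max? win (fun y => y) with
    | none => []
    | some m =>
      match PySem.List.index? win m with
      | none => []
      | some i => m :: selW (xs.drop (i+1)) t

theorem popWhileA_concat (k n i x t : Int) (l : List Int) :
    popWhileA k n i x (l ++ [t]) =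
      if ((l.length : Int) + 1 + n - i > k ∧ t < x) then popWhileA k n i x l
      else l ++ [t] := by
  cases l with
  | nil => simp [popWhileA]
  | cons a l' =>
    have hc : (a :: l') ++ [t] = a :: (l' ++ [t]) := rfl
    rw [hc, popWhileA]
    have h1 : (l' ++ [t]).getLastD a = t := by
      simp [List.getLastD_eq_getLast?]
    have h2 : (a :: (l' ++ [t])).dropLast = a :: l' := by
      rw [← hc, List.dropLast_concat]
    rw [h1, h2]
    have h3 : ((a :: (l' ++ [t])).length : Int) = ((a :: l').length : Int) + 1 := by
      simp
    rw [h3]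

theorem popD_eq_popWhileA (k n i x : Int) (s : List Int) :
    popD k (n - i) x s = (popWhileA k n i x s.reverse).reverse := by
  induction s with
  | nil => simp [popD, popWhileA]
  | cons t rest ih =>
    rw [popD, List.reverse_cons, popWhileA_concat]
    split_ifs with h1 h2 h2
    · rw [ih]
    · exfalso; apply h2
      refine ⟨?_, h1.2⟩
      have := h1.1; simp at this ⊢; omega
    · exfalso; apply h1
      refine ⟨?_, h2.2⟩
      have := h2.1; simp at this ⊢; omega
    · simp

theorem popWhileA_eq_popD (k n i x : Int) (res : List Int) :
    popWhileA k n i x res = (popD k (n - i) x res.reverse).reverse := by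
  have h := popD_eq_popWhileA k n i x res.reverse
  rw [List.reverse_reverse] at h
  rw [h, List.reverse_reverse]

theorem foldA_eq_runD (n k : Int) : ∀ (xs : List Int) (i0 : Int) (res : List Int),
    i0 + (xs.length : Int) = n →
    (PySem.List.enumerate xs i0).foldl
      (fun res p =>
        let r := popWhileA k n p.1 p.2 res
        if (r.length : Int) < k then r ++ [p.2] else r)
      res
    = (runD k xs res.reverse).reverse := by
  intro xs
  induction xs with
  | nil => intro i0 res _; simp [PySem.List.enumerate_nil, runD]
  | cons x xs ih =>
    intro i0 res hn
    rw [PySem.List.enumerate_cons, List.foldl_cons]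
    simp only [List.length_cons] at hn
    have hcast : n - i0 = (xs.length : Int) + 1 := by push_cast at hn ⊢; omega
    rw [ih (i0 + 1) _ (by push_cast at hn ⊢; omega), runD]
    congr 1
    congr 1
    show (if ((popWhileA k n i0 x res).length : Int) < k
        then popWhileA k n i0 x res ++ [x] else popWhileA k n i0 x res).reverse
      = stepD k ((xs.length : Int) + 1) x res.reverse
    rw [popWhileA_eq_popD, hcast, stepD]
    simp only [List.length_reverse]
    split_ifs <;> simp

theorem findMaxSubarr_eq_runD (nums : List Int) (k : Int) :
    findMaxSubarr nums k = (runD k nums []).reverse := by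
  have := foldA_eq_runD (nums.length : Int) k nums 0 [] (by simp)
  simpa [findMaxSubarr] using this

theorem runD_nonpos (k : Int) (hk : k ≤ 0) (xs : List Int) : runD k xs [] = [] := by
  induction xs with
  | nil => simp [runD]
  | cons x xs ih =>
    rw [runD]
    have : stepD k ((xs.length : Int) + 1) x [] = [] := by
      simp [stepD, popD]; omega
    rw [this]; exact ih

theorem popD_of_le (k d x : Int) (r : List Int) (h : (r.length : Int) + d ≤ k) :
    popD k d x r = r := by
  cases r with
  | nil => simp [popD]
  | cons t rest =>
    have hnc : ¬(((t :: rest).length : Int) + d > k ∧ t < x) := by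
      rintro ⟨hc, _⟩
      simp only [List.length_cons] at hc h
      push_cast at hc h
      omega
    rw [popD, if_neg hnc]

theorem runD_all (k : Int) (xs : List Int) : ∀ r : List Int,
    (r.length : Int) + (xs.length : Int) ≤ k → runD k xs r = xs.reverse ++ r := by
  induction xs with
  | nil => intro r _; simp [runD]
  | cons x xs ih =>
    intro r h
    simp only [List.length_cons] at h
    rw [runD]
    have hpop : popD k ((xs.length : Int) + 1) x r = r :=
      popD_of_le _ _ _ _ (by push_cast at h ⊢; omega)
    have hlen : ((r.length : Int)) < k := by push_cast at h ⊢; omega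
    rw [stepD, hpop]
    simp only [hlen, if_pos]
    rw [ih (x :: r) (by simp only [List.length_cons]; push_cast at h ⊢; omega)]
    simp

theorem popD_subset (k d x : Int) (r : List Int) : ∀ y ∈ popD k d x r, y ∈ r := by
  induction r with
  | nil => simp [popD]
  | cons t rest ih =>
    rw [popD]
    split_ifs with h
    · intro y hy; exact List.mem_cons_of_mem _ (ih y hy)
    · intro y hy; exact hy

theorem popD_all (k d x : Int) (h2 : k ≤ d) :
    ∀ r : List Int, (∀ y ∈ r, y < x) → popD k d x r = [] := by
  intro r
  induction r with
  | nil => intro _; simp [popD]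
  | cons t rest ih =>
    intro h1
    rw [popD]
    have hc : ((t :: rest).length : Int) + d > k ∧ t < x :=
      ⟨by simp; omega, h1 t (List.mem_cons_self ..)⟩
    rw [if_pos hc]
    exact ih (fun y hy => h1 y (List.mem_cons_of_mem _ hy))

theorem stepD_mem (k d x : Int) (r : List Int) :
    ∀ y ∈ stepD k d x r, y = x ∨ y ∈ r := by
  intro y hy
  rw [stepD] at hy
  split_ifs at hy with h
  · rcases List.mem_cons.mp hy with h1 | h1
    · exact Or.inl h1
    · exact Or.inr (popD_subset k d x r y h1)
  · exact Or.inr (popD_subset k d x r y hy)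

theorem runD_window (k : Int) (m : Int) (zs : List Int) (hk : 0 < k)
    (hkz : k ≤ (zs.length : Int) + 1) :
    ∀ ys r, (∀ y ∈ ys, y < m) → (∀ y ∈ r, y < m) →
      runD k (ys ++ m :: zs) r = runD k zs [m] := by
  intro ys
  induction ys with
  | nil =>
    intro r _ hr
    rw [List.nil_append, runD]
    have hpop : popD k ((zs.length : Int) + 1) m r = [] :=
      popD_all k _ m (by omega) r hr
    rw [stepD, hpop]
    have h0 : ((([] : List Int)).length : Int) < k := by simp; omega
    rw [if_pos h0]
  | cons y ys ih =>
    intro r hys hr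
    rw [List.cons_append, runD]
    apply ih
    · exact fun y' hy' => hys y' (List.mem_cons_of_mem _ hy')
    · intro y' hy'
      rcases stepD_mem _ _ _ _ y' hy' with h1 | h1
      · exact h1 ▸ hys y (List.mem_cons_self ..)
      · exact hr y' h1

theorem popD_concat (k d x m : Int) (hx : k ≤ d → x ≤ m) (r : List Int) :
    popD k d x (r ++ [m]) = (popD (k-1) d x r) ++ [m] := by
  induction r with
  | nil =>
    have hnc : ¬((([m] : List Int).length : Int) + d > k ∧ m < x) := by
      rintro ⟨h1, h2⟩
      simp at h1
      have := hx (by omega)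
      omega
    rw [List.nil_append,
      show popD k d x [m]
        = if (([m] : List Int).length : Int) + d > k ∧ m < x then popD k d x [] else [m]
        from rfl,
      if_neg hnc]
    rfl
  | cons t rest ih =>
    rw [List.cons_append, popD, popD]
    have hiff : (((t :: (rest ++ [m])).length : Int) + d > k ∧ t < x) ↔
        (((t :: rest).length : Int) + d > k - 1 ∧ t < x) := by
      simp only [List.length_cons, List.length_append, List.length_cons, List.length_nil]
      constructor <;> rintro ⟨h1, h2⟩ <;> exact ⟨by push_cast at h1 ⊢; omega, h2⟩
    split_ifs with h1 h2 h2
    · exact ih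
    · exact absurd (hiff.mp h1) h2
    · exact absurd (hiff.mpr h2) h1
    · rw [List.cons_append]

theorem stepD_concat (k d x m : Int) (hx : k ≤ d → x ≤ m) (r : List Int) :
    stepD k d x (r ++ [m]) = (stepD (k-1) d x r) ++ [m] := by
  rw [stepD, stepD, popD_concat k d x m hx]
  have hiff : (((popD (k-1) d x r ++ [m]).length : Int) < k) ↔
      (((popD (k-1) d x r).length : Int) < k - 1) := by
    simp only [List.length_append, List.length_cons, List.length_nil]
    push_cast
    omega
  split_ifs with h1 h2 h2
  · rw [List.cons_append]
  · exact absurd (hiff.mp h1) h2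
  · exact absurd (hiff.mpr h2) h1
  · rfl

theorem runD_concat (k m : Int) : ∀ (zs : List Int) (r : List Int),
    (∀ p (hp : p < zs.length), k ≤ ((zs.length : Int) - p) → zs[p] ≤ m) →
      runD k zs (r ++ [m]) = (runD (k-1) zs r) ++ [m] := by
  intro zs
  induction zs with
  | nil => intro r _; rw [runD, runD]
  | cons z zs ih =>
    intro r H
    have hx : k ≤ ((zs.length : Int) + 1) → z ≤ m := by
      intro hkd
      have := H 0 (by simp) (by simp; omega)
      simpa using this
    rw [runD, runD, stepD_concat k _ z m hx]
    apply ih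
    intro p hp hk'
    have := H (p+1) (by simp; omega) (by simp at hk' ⊢; omega)
    simpa using this

theorem runD_eq_selW : ∀ (t : Nat) (xs : List Int), 0 < t → t ≤ xs.length →
    (runD (t : Int) xs []).reverse = selW xs t := by
  intro t
  induction t with
  | zero => intro xs h0 _; exact absurd h0 (lt_irrefl 0)
  | succ t ih =>
    intro xs h0 h1
    set win := xs.take (xs.length - t) with hwin
    have hwinlen : win.length = xs.length - t := by
      simp only [hwin, List.length_take]
      omega
    have hwinne : win ≠ [] := by
      intro hnil
      rw [hnil] at hwinlen
      simp at hwinlen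
      omega
    obtain ⟨m, hm⟩ : ∃ m, PySem.List.max? win (fun y => y) = some m := by
      cases hmx : PySem.List.max? win (fun y => y) with
      | none => exact absurd ((PySem.List.max?_eq_none_iff _ _).mp hmx) hwinne
      | some m => exact ⟨m, rfl⟩
    have hmmem := PySem.List.max?_mem hm
    have hmax : ∀ y ∈ win, y ≤ m := PySem.List.max?_isMax hm
    obtain ⟨i, hi⟩ : ∃ i, PySem.List.index? win m = some i :=
      Option.isSome_iff_exists.mp ((PySem.List.index?_isSome_iff _ _).mpr hmmem)
    obtain ⟨pre, suf, hsplit, hlenpre, hnotpre⟩ := (PySem.List.index?_eq_some_iff _ _ _).mp hi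
    set zs := suf ++ xs.drop (xs.length - t) with hzs
    have hxs : xs = pre ++ m :: zs := by
      conv_lhs => rw [← List.take_append_drop (xs.length - t) xs]
      rw [← hwin, hsplit, hzs, List.append_assoc, List.cons_append]
    have hsuf : win.length = pre.length + 1 + suf.length := by
      rw [hsplit]
      simp
      omega
    have hdroplen : (xs.drop (xs.length - t)).length = t := by
      simp
      omega
    have hzlen : zs.length = suf.length + t := by
      rw [hzs, List.length_append, hdroplen]
    have htz : t ≤ zs.length := by omega
    have hys : ∀ y ∈ pre, y < m := by
      intro y hy
      have hyw : y ∈ win := hsplit ▸ List.mem_append_left _ hy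
      exact lt_of_le_of_ne (hmax y hyw) (fun he => hnotpre (he ▸ hy))
    have hA1 : runD ((t : Int) + 1) xs [] = runD ((t : Int) + 1) zs [m] := by
      rw [hxs]
      exact runD_window _ m zs (by omega) (by omega) pre [] hys (by simp)
    have hH : ∀ p (hp : p < zs.length), ((t : Int) + 1) ≤ ((zs.length : Int) - p) → zs[p] ≤ m := by
      intro p hp hk'
      have hps : p < suf.length := by
        push_cast at hk'
        omega
      have hpe : zs[p] = suf[p] := by
        simp only [hzs]
        exact List.getElem_append_left hps
      have hsm : suf[p] ∈ win := by
        rw [hsplit]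
        exact List.mem_append_right _ (List.mem_cons_of_mem _ (List.getElem_mem hps))
      rw [hpe]
      exact hmax _ hsm
    have hA2 : runD ((t : Int) + 1) zs [m] = runD ((t : Int)) zs [] ++ [m] := by
      have h := runD_concat ((t : Int) + 1) m zs [] hH
      simpa using h
    have hdrop : xs.drop (i + 1) = zs := by
      have hl : (pre ++ [m]).length = i + 1 := by simp [hlenpre]
      calc xs.drop (i + 1) = ((pre ++ [m]) ++ zs).drop (i + 1) := by
            rw [hxs]; simp [List.append_assoc]
        _ = zs := List.drop_left' hl
    have hsel : selW xs (t + 1) = m :: selW zs t := by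
      rw [selW, ← hwin, hm]
      simp only [hi, hdrop]
    rw [hsel]
    have hcast : ((t + 1 : Nat) : Int) = (t : Int) + 1 := by push_cast; ring
    rw [hcast, hA1, hA2, List.reverse_append]
    simp only [List.reverse_cons, List.reverse_nil, List.nil_append, List.singleton_append]
    congr 1
    by_cases ht0 : t = 0
    · subst ht0
      rw [runD_nonpos _ (by simp) zs]
      simp [selW]
    · exact ih zs (Nat.pos_of_ne_zero ht0) htz

theorem alt_loop_eq_selW (nums : List Int) (k : Int) :
    ∀ (t s : Nat) (res : List Int), 0 < t → (t : Int) ≤ k → s + t ≤ nums.length →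
    ((PySem.List.pyRange (k - t) k 1).foldl
      (fun (st : Int × List Int) j =>
        let window := PySem.List.slice nums (some st.1) (some ((nums.length : Int) - k + j + 1))
        match PySem.List.max? window (fun y => y) with
        | none => st
        | some m =>
          match PySem.List.index? window m with
          | none => st
          | some i => (st.1 + (i : Int) + 1, st.2 ++ [m]))
      ((s : Int), res)).2 = res ++ selW (nums.drop s) t := by
  intro t
  induction t with
  | zero => intro s res h0 _ _; exact absurd h0 (lt_irrefl 0)
  | succ t ih =>
    intro s res _ hk hs
    have hcast : ((t + 1 : Nat) : Int) = (t : Int) + 1 := by push_cast; ring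
    rw [hcast]
    have hlt : k - ((t : Int) + 1) < k := by omega
    rw [PySem.List.pyRange_one_cons hlt, List.foldl_cons,
        show k - ((t : Int) + 1) + 1 = k - (t : Int) by ring]
    have hxlen : (nums.drop s).length = nums.length - s := by simp
    have htx : t ≤ (nums.drop s).length := by omega
    have hwin' : PySem.List.slice nums (some ((s : Nat) : Int))
        (some ((nums.length : Int) - k + (k - ((t : Int) + 1)) + 1))
        = (nums.drop s).take ((nums.drop s).length - t) := by
      have hb : (nums.length : Int) - k + (k - ((t : Int) + 1)) + 1
          = (((nums.length - t : Nat)) : Int) := by omega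
      rw [hb, PySem.List.slice_toNat _ (by positivity) (by positivity)]
      simp only [Int.toNat_natCast]
      congr 1
      omega
    have hwinlen : ((nums.drop s).take ((nums.drop s).length - t)).length
        = (nums.drop s).length - t := by
      simp only [List.length_take]
      omega
    have hwinne : (nums.drop s).take ((nums.drop s).length - t) ≠ [] := by
      intro hnil
      rw [hnil] at hwinlen
      simp at hwinlen
      omega
    obtain ⟨m, hm⟩ : ∃ m, PySem.List.max? ((nums.drop s).take ((nums.drop s).length - t))
        (fun y => y) = some m := by
      cases hmx : PySem.List.max? ((nums.drop s).take ((nums.drop s).length - t))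
          (fun y => y) with
      | none => exact absurd ((PySem.List.max?_eq_none_iff _ _).mp hmx) hwinne
      | some m => exact ⟨m, rfl⟩
    obtain ⟨i, hi⟩ : ∃ i, PySem.List.index? ((nums.drop s).take ((nums.drop s).length - t)) m
        = some i :=
      Option.isSome_iff_exists.mp
        ((PySem.List.index?_isSome_iff _ _).mpr (PySem.List.max?_mem hm))
    have hilt : i < (nums.drop s).length - t := by
      have h := (PySem.List.getElem_of_index?_eq_some hi).1
      rw [hwinlen] at h
      exact h
    have hsel : selW (nums.drop s) (t + 1) = m :: selW ((nums.drop s).drop (i + 1)) t := by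
      rw [selW, hm]
      simp only [hi]
    have hdd : (nums.drop s).drop (i + 1) = nums.drop (s + (i + 1)) := List.drop_drop ..
    simp only [hwin', hm, hi, hsel]
    by_cases ht0 : t = 0
    · subst ht0
      rw [show k - ((0 : Nat) : Int) = k by simp, PySem.List.pyRange_one_eq_nil (le_refl k),
        List.foldl_nil]
      simp [selW]
    · have hlast := ih (s + (i + 1)) (res ++ [m]) (Nat.pos_of_ne_zero ht0)
        (by omega) (by omega)
      rw [show ((s : Int) + (i : Int) + 1) = (((s + (i + 1) : Nat)) : Int) by push_cast; ring]
      rw [hlast, hdd]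
      simp

-- ===== VERDICT (by name: the statement is the Claim_ definition above) =====
theorem findMaxSubarr_spec : Claim_equal_findMaxSubarr := by
  intro nums k _dom
  unfold Spec_findMaxSubarr
  rw [findMaxSubarr_eq_runD]
  unfold findMaxSubarr_alt
  by_cases hk0 : k ≤ 0
  · rw [if_pos hk0, runD_nonpos k hk0]
    simp
  · rw [if_neg hk0]
    by_cases hkn : (nums.length : Int) ≤ k
    · rw [if_pos hkn, runD_all k nums [] (by simpa using hkn)]
      simp
    · rw [if_neg hkn]
      have h0 : 0 < k.toNat := by omega
      have h1 : k.toNat ≤ nums.length := by omega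
      have hloop := alt_loop_eq_selW nums k k.toNat 0 [] h0 (by omega) (by omega)
      rw [show k - ((k.toNat : Nat) : Int) = 0 by omega] at hloop
      simp only [List.drop_zero, List.nil_append, Nat.cast_zero] at hloop
      rw [hloop, show k = ((k.toNat : Nat) : Int) by omega]
      exact runD_eq_selW k.toNat nums h0 h1
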